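-- pv_equiv track=rewrite | github.com/JaiEnfer/ai-job-agent | app/services/cv_generator.py | build_tailored_experience_bullets
-- ===== SOURCE A (Python) =====
-- from typing import List
--
-- def split_text_to_points(text: str) -> List[str]:
--     if not text:
--         return []
--
--     separators = ["\n", ".", ";"]
--     chunks = [text]
--
--     for sep in separators:
--         new_chunks = []
--         for chunk in chunks:
--             new_chunks.extend(chunk.split(sep))
--         chunks = new_chunks
--
--     cleaned = [chunk.strip() for chunk in chunks if chunk.strip()]
--     return cleaned
--
-- def build_tailored_experience_bullets(
--     experience_text: str,
--     matched_skills: List[str],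
--     missing_skills: List[str],
-- ) -> List[str]:
--     raw_points = split_text_to_points(experience_text)
--
--     bullets = []
--
--     for point in raw_points:
--         point_lower = point.lower()
--
--         if any(skill.lower() in point_lower for skill in matched_skills):
--             bullets.append(point)
--
--     if not bullets:
--         bullets = raw_points[:4]
--
--     enhanced_bullets = []
--     for bullet in bullets[:6]:
--         enhanced_bullets.append(f"Demonstrated experience relevant to the target role: {bullet}")
--
--     if missing_skills:
--         enhanced_bullets.append(
--             f"Tailoring opportunity: strengthen evidence for {', '.join(missing_skills[:3])} in project and experience bullets."
--         )
--
--     return enhanced_bullets[:6]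
-- ===== SOURCE B (Python) =====
-- from typing import List
--
-- def build_tailored_experience_bullets(
--     experience_text: str,
--     matched_skills: List[str],
--     missing_skills: List[str],
-- ) -> List[str]:
--     # Single character-level scan with bounded accumulators: no intermediate
--     # chunk lists are ever built; the first four points and the first six
--     # matching points are collected on the fly while the text is streamed once.
--     lowered = [s.lower() for s in matched_skills]
--     first4: List[str] = []
--     matched: List[str] = []
--     cur: List[str] = []
--
--     def flush() -> None:
--         point = "".join(cur).strip()
--         del cur[:]
--         if point:
--             if len(first4) < 4:
--                 first4.append(point)
--             pl = point.lower()
--             if len(matched) < 6 and any(sk in pl for sk in lowered):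
--                 matched.append(point)
--
--     for ch in experience_text:
--         if ch in "\n.;":
--             flush()
--         else:
--             cur.append(ch)
--     flush()
--
--     bullets = matched if matched else first4
--     out = ["Demonstrated experience relevant to the target role: " + b for b in bullets]
--     if missing_skills:
--         out.append(
--             f"Tailoring opportunity: strengthen evidence for {', '.join(missing_skills[:3])} in project and experience bullets."
--         )
--     return out[:6]
-- ===== Notes on version B (the rewrite author's own statement) =====
-- stated objective: alternative
-- what changed: Replaces A's staged pipeline (three whole-list splitting passes producing a full points list, then a filtering pass, a fallback slice, and a capped formatting pass) with a single character-level streaming scan that flushes points at separators and maintains two bounded accumulators (first four points, first six matching points) on the fly, never materializing the chunk or points lists.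
import Mathlib
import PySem

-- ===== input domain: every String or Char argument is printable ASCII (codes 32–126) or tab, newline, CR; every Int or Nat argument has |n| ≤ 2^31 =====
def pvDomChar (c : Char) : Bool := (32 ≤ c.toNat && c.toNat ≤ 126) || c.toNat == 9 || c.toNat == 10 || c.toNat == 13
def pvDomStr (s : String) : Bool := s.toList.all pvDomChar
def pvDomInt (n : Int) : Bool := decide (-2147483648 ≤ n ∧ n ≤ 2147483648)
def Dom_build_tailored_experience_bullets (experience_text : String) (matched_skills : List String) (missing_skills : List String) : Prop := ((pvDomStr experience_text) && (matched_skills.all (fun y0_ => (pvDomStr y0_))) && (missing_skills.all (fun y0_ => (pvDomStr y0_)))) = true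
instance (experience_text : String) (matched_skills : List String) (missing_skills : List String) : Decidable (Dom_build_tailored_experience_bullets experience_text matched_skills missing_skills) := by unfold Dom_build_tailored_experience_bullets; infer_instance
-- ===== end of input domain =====

-- B replaces A's staged pipeline (three whole-list splitting passes, then filter, fallback and formatting
-- passes) with one character-level streaming scan keeping bounded accumulators; same results, similar cost.


-- ===== PORT A =====
-- helper split_text_to_points of A, on the List Char level (strings enter/leave as String in the entry point)
def split_text_to_points (text : List Char) : List (List Char) :=
  if text = [] then []
  else
    -- for sep in separators: chunks = [piece for chunk in chunks for piece in chunk.split(sep)]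
    let chunks := [['\n'], ['.'], [';']].foldl
      (fun chunks sep => chunks.flatMap (fun chunk => PySem.Chars.splitOn chunk sep)) [text]
    (chunks.filter (fun chunk => PySem.Chars.strip chunk ≠ [])).map PySem.Chars.strip

def build_tailored_experience_bullets (experience_text : String) (matched_skills : List String) (missing_skills : List String) : List String :=
  let raw_points := split_text_to_points experience_text.toList
  -- append-if loop over raw_points
  let bullets := raw_points.filter (fun point =>
    let point_lower := PySem.Chars.lower point
    matched_skills.any (fun skill => PySem.Chars.isIn (PySem.Chars.lower skill.toList) point_lower))
  let bullets := if bullets = [] then raw_points.take 4 else bullets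
  let enhanced_bullets := (bullets.take 6).map
    (fun bullet => "Demonstrated experience relevant to the target role: ".toList ++ bullet)
  let enhanced_bullets :=
    if missing_skills ≠ [] then
      enhanced_bullets ++ ["Tailoring opportunity: strengthen evidence for ".toList ++
        PySem.Chars.join (", ".toList) ((missing_skills.take 3).map String.toList) ++
        " in project and experience bullets.".toList]
    else enhanced_bullets
  (enhanced_bullets.take 6).map String.ofList

-- ===== PORT B =====
-- B's flush(): strip the current run; if nonempty, append to first4 (while < 4) and,
-- when it matches a lowered skill, to matched (while < 6); clear the run buffer.
def pvFlushB (lowered : List (List Char)) (st : List (List Char) × List (List Char) × List Char) :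
    List (List Char) × List (List Char) × List Char :=
  let point := PySem.Chars.strip st.2.2
  if point = [] then (st.1, st.2.1, [])
  else
    ((if st.1.length < 4 then st.1 ++ [point] else st.1),
     (let pl := PySem.Chars.lower point
      if st.2.1.length < 6 && lowered.any (fun sk => PySem.Chars.isIn sk pl) then
        st.2.1 ++ [point]
      else st.2.1),
     [])

def build_tailored_experience_bullets_alt (experience_text : String) (matched_skills : List String) (missing_skills : List String) : List String :=
  let lowered := matched_skills.map (fun s => PySem.Chars.lower s.toList)
  -- for ch in experience_text: flush at a separator, else accumulate
  -- (the 1-char membership test ch in "\n.;" is ported exactly as the 3-way disjunction)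
  let st := experience_text.toList.foldl
    (fun st ch => if ch == '\n' || ch == '.' || ch == ';' then pvFlushB lowered st
                  else (st.1, st.2.1, st.2.2 ++ [ch]))
    ([], [], [])
  let st := pvFlushB lowered st
  let bullets := if st.2.1 ≠ [] then st.2.1 else st.1
  let out := bullets.map (fun b => "Demonstrated experience relevant to the target role: ".toList ++ b)
  let out :=
    if missing_skills ≠ [] then
      out ++ ["Tailoring opportunity: strengthen evidence for ".toList ++
        PySem.Chars.join (", ".toList) ((missing_skills.take 3).map String.toList) ++
        " in project and experience bullets.".toList]
    else out
  (out.take 6).map String.ofList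

-- ===== PRECONDITION & SPEC =====
def Spec_build_tailored_experience_bullets (experience_text : String) (matched_skills : List String) (missing_skills : List String) (out : List String) : Prop := out = build_tailored_experience_bullets_alt experience_text matched_skills missing_skills
instance (experience_text : String) (matched_skills : List String) (missing_skills : List String) (out : List String) : Decidable (Spec_build_tailored_experience_bullets experience_text matched_skills missing_skills out) := by unfold Spec_build_tailored_experience_bullets; infer_instance

-- ===== CLAIM (what is proved, stated in full; the proofs are below) =====
def Claim_equal_build_tailored_experience_bullets : Prop := ∀ (experience_text : String) (matched_skills : List String) (missing_skills : List String), Dom_build_tailored_experience_bullets experience_text matched_skills missing_skills → Spec_build_tailored_experience_bullets experience_text matched_skills missing_skills (build_tailored_experience_bullets experience_text matched_skills missing_skills)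

-- ===== LEMMAS AND PROOFS =====

-- the common separator predicate
def pvSep (c : Char) : Bool := c == '\n' || c == '.' || c == ';'

-- reference single-pass splitter (keeps empty pieces), used only in the proofs
def pvSplitCh (p : Char → Bool) : List Char → List (List Char)
  | [] => [[]]
  | c :: cs => if p c then [] :: pvSplitCh p cs else (pvSplitCh p cs).modifyHead (c :: ·)

theorem pvSplitCh_ne_nil (p : Char → Bool) (l : List Char) : pvSplitCh p l ≠ [] := by
  cases l with
  | nil => simp [pvSplitCh]
  | cons c cs =>
    simp only [pvSplitCh]
    split
    · simp
    · cases h : pvSplitCh p cs with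
      | nil => exact absurd h (pvSplitCh_ne_nil p cs)
      | cons a t => simp

theorem pvFlatMap_splitCh (p q : Char → Bool) (l : List Char) :
    (pvSplitCh p l).flatMap (pvSplitCh q) = pvSplitCh (fun x => p x || q x) l := by
  induction l with
  | nil => simp [pvSplitCh]
  | cons x xs ih =>
    by_cases hp : p x = true
    · simp only [pvSplitCh, hp, if_pos, Bool.true_or]
      simpa [pvSplitCh, List.flatMap_cons] using ih
    · simp only [pvSplitCh, hp, Bool.false_or]
      cases hs : pvSplitCh p xs with
      | nil => exact absurd hs (pvSplitCh_ne_nil _ xs)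
      | cons a t =>
        rw [hs] at ih
        have hqx : pvSplitCh q (x :: a) = if q x then [] :: pvSplitCh q a else (pvSplitCh q a).modifyHead (x :: ·) := rfl
        by_cases hq : q x = true
        · rw [if_pos hq]
          simp only [if_neg (by decide : ¬(false = true)), List.modifyHead]
          rw [← ih]
          simp only [List.flatMap_cons]
          rw [hqx, if_pos hq]
          simp
        · rw [if_neg hq]
          simp only [if_neg (by decide : ¬(false = true)), List.modifyHead]
          rw [← ih]
          simp only [List.flatMap_cons]
          rw [hqx, if_neg hq]
          cases ht : pvSplitCh q a with
          | nil => exact absurd ht (pvSplitCh_ne_nil _ a)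
          | cons b u => simp [List.modifyHead]

theorem pvSplitOn_go_single (c : Char) (fuel : Nat) (l cur : List Char)
    (acc : List (List Char)) (h : l.length < fuel) :
    PySem.Chars.splitOn.go [c] fuel l cur acc
      = acc.reverse ++ (pvSplitCh (· == c) l).modifyHead (fun h => cur.reverse ++ h) := by
  induction fuel generalizing l cur acc with
  | zero => omega
  | succ f ih =>
    cases l with
    | nil => simp [PySem.Chars.splitOn.go, pvSplitCh]
    | cons x rest =>
      simp only [PySem.Chars.splitOn.go]
      by_cases hx : x = c
      · subst hx
        have hp : List.isPrefixOf [x] (x :: rest) = true := by simp [List.isPrefixOf]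
        rw [if_pos hp]
        simp only [List.length, List.drop_succ_cons, List.drop_zero]
        rw [ih rest [] (cur.reverse :: acc) (by simpa using Nat.lt_of_succ_lt_succ h)]
        simp only [pvSplitCh, if_pos (by simp : ((x == x) = true))]
        cases pvSplitCh (· == x) rest <;> simp
      · have hp : List.isPrefixOf [c] (x :: rest) = false := by
          simp [List.isPrefixOf]
          intro hc; exact absurd hc.symm hx
        rw [if_neg (by simp [hp])]
        rw [ih rest (x :: cur) acc (by simpa using Nat.lt_of_succ_lt_succ h)]
        simp only [pvSplitCh, if_neg (by simp [hx] : ¬ ((x == c) = true))]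
        congr 1
        cases hs : pvSplitCh (· == c) rest with
        | nil => exact absurd hs (pvSplitCh_ne_nil _ rest)
        | cons a t => simp

theorem pvSplitOn_single (c : Char) (l : List Char) :
    PySem.Chars.splitOn l [c] = pvSplitCh (· == c) l := by
  rw [PySem.Chars.splitOn, pvSplitOn_go_single c (l.length + 1) l [] [] (by omega)]
  cases pvSplitCh (· == c) l <;> simp

-- the cleaned points of a fragment list
def pvPts (frs : List (List Char)) : List (List Char) :=
  (frs.map PySem.Chars.strip).filter (fun p => p ≠ [])

theorem pvPts_eq_filter_map (l : List (List Char)) :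
    (l.filter (fun c => PySem.Chars.strip c ≠ [])).map PySem.Chars.strip = pvPts l := by
  induction l with
  | nil => rfl
  | cons c t ih => by_cases h : PySem.Chars.strip c = [] <;> simp [pvPts, h] <;>
      simpa [pvPts] using ih

-- A's raw_points are exactly the cleaned one-pass split
theorem pvPointsA (text : List Char) :
    split_text_to_points text = pvPts (pvSplitCh pvSep text) := by
  by_cases h : text = []
  · subst h; decide
  · simp only [split_text_to_points, if_neg h, List.foldl_cons, List.foldl_nil,
      List.flatMap_singleton]
    simp only [pvSplitOn_single, pvFlatMap_splitCh]
    rw [pvPts_eq_filter_map]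
    rfl

-- B's point matcher and abstract per-point step
def pvMatchP (lowered : List (List Char)) (p : List Char) : Bool :=
  lowered.any (fun sk => PySem.Chars.isIn sk (PySem.Chars.lower p))

def pvStepP (lowered : List (List Char)) (st : List (List Char) × List (List Char)) (frag : List Char) :
    List (List Char) × List (List Char) :=
  let point := PySem.Chars.strip frag
  if point = [] then st
  else
    ((if st.1.length < 4 then st.1 ++ [point] else st.1),
     (if st.2.length < 6 && pvMatchP lowered point then st.2 ++ [point] else st.2))

theorem pvFlushB_eq (lowered : List (List Char)) (f4 m : List (List Char)) (cur : List Char) :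
    pvFlushB lowered (f4, m, cur) = ((pvStepP lowered (f4, m) cur).1, (pvStepP lowered (f4, m) cur).2, []) := by
  by_cases h : PySem.Chars.strip cur = [] <;> simp [pvFlushB, pvStepP, pvMatchP, h]

theorem pvModifyHead_id (l : List (List Char)) : l.modifyHead (fun h => [] ++ h) = l := by
  cases l <;> rfl

-- the streaming scan computes the per-point fold over the one-pass split
theorem pvScan (lowered : List (List Char)) (l : List Char) (f4 m : List (List Char)) (cur : List Char) :
    pvFlushB lowered (l.foldl
        (fun st ch => if ch == '\n' || ch == '.' || ch == ';' then pvFlushB lowered st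
                      else (st.1, st.2.1, st.2.2 ++ [ch])) (f4, m, cur))
      = ((List.foldl (pvStepP lowered) (f4, m) ((pvSplitCh pvSep l).modifyHead (cur ++ ·))).1,
         (List.foldl (pvStepP lowered) (f4, m) ((pvSplitCh pvSep l).modifyHead (cur ++ ·))).2, []) := by
  induction l generalizing f4 m cur with
  | nil =>
    simp only [List.foldl_nil, pvSplitCh, List.modifyHead, List.foldl_cons, List.foldl_nil,
      List.append_nil, pvFlushB_eq]
  | cons x xs ih =>
    by_cases hx : pvSep x = true
    · have hx' : (x == '\n' || x == '.' || x == ';') = true := hx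
      simp only [List.foldl_cons, hx', if_pos]
      rw [pvFlushB_eq lowered f4 m cur, ih]
      have hsp : pvSplitCh pvSep (x :: xs) = [] :: pvSplitCh pvSep xs := by
        simp [pvSplitCh, hx]
      rw [hsp]
      simp only [List.modifyHead, List.append_nil, List.foldl_cons, Prod.mk.injEq]
      cases pvSplitCh pvSep xs <;> simp
    · have hx' : (x == '\n' || x == '.' || x == ';') = false := by
        simpa [pvSep] using hx
      simp only [List.foldl_cons, hx', Bool.false_eq_true, if_neg, not_false_iff]
      rw [ih]
      have hsp : pvSplitCh pvSep (x :: xs) = (pvSplitCh pvSep xs).modifyHead (x :: ·) := by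
        simp [pvSplitCh, hx]
      rw [hsp]
      cases hs : pvSplitCh pvSep xs with
      | nil => exact absurd hs (pvSplitCh_ne_nil _ xs)
      | cons a t => simp [List.modifyHead]

-- the per-point fold computes the first four points and the first six matching points
theorem pvFoldP (lowered : List (List Char)) (frs : List (List Char)) (f4 m : List (List Char)) :
    List.foldl (pvStepP lowered) (f4, m) frs
      = (f4 ++ (pvPts frs).take (4 - f4.length),
         m ++ ((pvPts frs).filter (pvMatchP lowered)).take (6 - m.length)) := by
  induction frs generalizing f4 m with
  | nil => simp [pvPts]
  | cons fr rest ih =>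
    simp only [List.foldl_cons]
    by_cases h : PySem.Chars.strip fr = []
    · rw [show pvStepP lowered (f4, m) fr = (f4, m) from by simp [pvStepP, h]]
      rw [ih]
      have hpts : pvPts (fr :: rest) = pvPts rest := by simp [pvPts, h]
      rw [hpts]
    · have hpts : pvPts (fr :: rest) = PySem.Chars.strip fr :: pvPts rest := by
        simp [pvPts, h]
      have hstep : pvStepP lowered (f4, m) fr =
          ((if f4.length < 4 then f4 ++ [PySem.Chars.strip fr] else f4),
           (if m.length < 6 && pvMatchP lowered (PySem.Chars.strip fr) then
              m ++ [PySem.Chars.strip fr] else m)) := by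
        simp [pvStepP, h]
      rw [hstep, ih, hpts]
      simp only [Prod.mk.injEq]
      constructor
      · by_cases h4 : f4.length < 4
        · rw [if_pos h4]
          rw [show 4 - f4.length = (4 - (f4.length + 1)) + 1 from by omega]
          simp [List.take_succ_cons]
        · rw [if_neg h4]
          rw [show 4 - f4.length = 0 from by omega]
          simp
      · by_cases hm : pvMatchP lowered (PySem.Chars.strip fr) = true
        · rw [List.filter_cons_of_pos hm]
          by_cases h6 : m.length < 6
          · rw [if_pos (by simp [h6, hm])]
            rw [show 6 - m.length = (6 - (m.length + 1)) + 1 from by omega]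
            simp [List.take_succ_cons]
          · rw [if_neg (by simp [h6])]
            rw [show 6 - m.length = 0 from by omega]
            simp
        · rw [List.filter_cons_of_neg (by simp [hm]),
            if_neg (by simp [hm])]

-- assembling the output from the cleaned points, shaped like A's tail
def pvOut (pts : List (List Char)) (ms mi : List String) : List String :=
  let bl := pts.filter (fun point =>
    let point_lower := PySem.Chars.lower point
    ms.any (fun skill => PySem.Chars.isIn (PySem.Chars.lower skill.toList) point_lower))
  let bullets := if bl = [] then pts.take 4 else bl
  let out := (bullets.take 6).map
    (fun bullet => "Demonstrated experience relevant to the target role: ".toList ++ bullet)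
  let out :=
    if mi ≠ [] then
      out ++ ["Tailoring opportunity: strengthen evidence for ".toList ++
        PySem.Chars.join (", ".toList) ((mi.take 3).map String.toList) ++
        " in project and experience bullets.".toList]
    else out
  (out.take 6).map String.ofList

theorem pvA_char (t : String) (ms mi : List String) :
    build_tailored_experience_bullets t ms mi = pvOut (pvPts (pvSplitCh pvSep t.toList)) ms mi := by
  simp only [build_tailored_experience_bullets, pvPointsA]
  rfl

theorem pvMatchP_map (ms : List String) (p : List Char) :
    pvMatchP (ms.map (fun s => PySem.Chars.lower s.toList)) p
      = ms.any (fun skill => PySem.Chars.isIn (PySem.Chars.lower skill.toList) (PySem.Chars.lower p)) := by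
  simp [pvMatchP, List.any_map, Function.comp_def]

theorem pvB_char (t : String) (ms mi : List String) :
    build_tailored_experience_bullets_alt t ms mi = pvOut (pvPts (pvSplitCh pvSep t.toList)) ms mi := by
  simp only [build_tailored_experience_bullets_alt]
  rw [pvScan, pvModifyHead_id, pvFoldP]
  simp only [List.nil_append, List.length_nil, Nat.sub_zero]
  rw [pvOut]
  generalize hP : pvPts (pvSplitCh pvSep t.toList) = pts
  have hfil : pts.filter (pvMatchP (ms.map (fun s => PySem.Chars.lower s.toList)))
      = pts.filter (fun point =>
          let point_lower := PySem.Chars.lower point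
          ms.any (fun skill => PySem.Chars.isIn (PySem.Chars.lower skill.toList) point_lower)) := by
    apply List.filter_congr
    intro p _
    exact pvMatchP_map ms p
  rw [hfil]
  generalize (pts.filter (fun point =>
      let point_lower := PySem.Chars.lower point
      ms.any (fun skill => PySem.Chars.isIn (PySem.Chars.lower skill.toList) point_lower))) = bl
  by_cases hbl : bl = []
  · subst hbl
    simp [List.take_take]
  · have h6 : bl.take 6 ≠ [] := by
      cases bl with
      | nil => exact absurd rfl hbl
      | cons a b => simp
    simp only [if_neg hbl]
    rw [if_pos h6]

-- ===== VERDICT (by name: the statement is the Claim_ definition above) =====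
theorem build_tailored_experience_bullets_spec : Claim_equal_build_tailored_experience_bullets := by
  intro t ms mi _
  show _ = _
  rw [pvA_char, pvB_char]
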